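-- pv_equiv track=rewrite | github.com/dmitry-pechersky/algorithms | hackerearth/The Parking Slot.py | park
-- ===== SOURCE A (Python) =====
-- def park(distances, parking_order, capacities, k, f):
--     costs = [-1] * k
--     car = 0
--     for parking in parking_order:
--         for j in range(capacities[parking]):
--             if car < k:
--                 costs[car] = f + distances[parking]
--                 car += 1
--             else:
--                 break
--     return costs
-- ===== SOURCE B (Python) =====
-- def park(distances, parking_order, capacities, k, f):
--     # Prefix sums: cars_by[i] = number of cars parked after the first i+1 parkings.
--     cars_by = []
--     total = 0
--     for p in parking_order:
--         total += max(0, capacities[p])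
--         cars_by.append(total)
--     # Assign each car its serving parking with a forward-moving pointer j.
--     costs = []
--     j = 0
--     for car in range(k):
--         while j < len(parking_order) and cars_by[j] <= car:
--             j += 1
--         if j == len(parking_order):
--             costs.append(-1)
--         else:
--             costs.append(f + distances[parking_order[j]])
--     return costs
-- ===== Notes on version B (the rewrite author's own statement) =====
-- stated objective: alternative
-- what changed: B precomputes a prefix-sum table of clamped capacities along parking_order and then iterates over the k cars, moving a forward pointer through the table to find each car's serving parking (two-pointer merge, -1 once the table is exhausted), instead of A's pre-sized array filled one car at a time by an index cursor with a per-car inner loop per parking.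
import Mathlib
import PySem

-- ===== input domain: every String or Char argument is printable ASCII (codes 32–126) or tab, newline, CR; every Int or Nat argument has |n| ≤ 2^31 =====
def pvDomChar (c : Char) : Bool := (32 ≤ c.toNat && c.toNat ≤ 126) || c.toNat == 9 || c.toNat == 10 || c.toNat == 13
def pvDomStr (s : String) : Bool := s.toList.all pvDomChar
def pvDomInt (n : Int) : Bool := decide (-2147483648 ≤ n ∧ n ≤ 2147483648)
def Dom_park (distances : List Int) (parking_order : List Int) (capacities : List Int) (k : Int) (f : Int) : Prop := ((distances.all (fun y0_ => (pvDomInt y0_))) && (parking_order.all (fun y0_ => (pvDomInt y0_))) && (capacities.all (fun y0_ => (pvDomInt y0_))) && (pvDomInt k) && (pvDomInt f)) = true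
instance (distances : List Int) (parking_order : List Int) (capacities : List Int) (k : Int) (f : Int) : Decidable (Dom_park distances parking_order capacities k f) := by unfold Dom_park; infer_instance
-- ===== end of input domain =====

-- B replaces A's per-car cursor filling of a pre-sized array by a prefix-sum table of
-- capacities plus a per-car forward-moving pointer that finds each car's serving parking
-- (a two-pointer merge); equal on Pre_park.

-- ===== PORT A =====
-- inner 'for j in range(capacities[parking]): if car < k: costs[car] = v; car += 1 else: break'
def parkInner (cnt : Nat) (costs : List Int) (car : Int) (k : Int) (v : Int) : List Int × Int :=
  match cnt with
  | 0 => (costs, car)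
  | n + 1 =>
    if car < k then parkInner n (PySem.List.pySetD costs car v) (car + 1) k v
    else (costs, car)

def park (distances : List Int) (parking_order : List Int) (capacities : List Int) (k : Int) (f : Int) : List Int :=
  let init : List Int × Int := (List.replicate k.toNat (-1), 0)
  (parking_order.foldl (fun st parking =>
      parkInner (PySem.List.pyGetD capacities parking 0).toNat st.1 st.2 k
        (f + PySem.List.pyGetD distances parking 0)) init).1

-- ===== PORT B =====
-- 'while j < len(parking_order) and cars_by[j] <= car: j += 1'
def parkAdvance (cars_by : List Int) (len j : Nat) (car : Int) : Nat :=
  if h : j < len then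
    if PySem.List.pyGetD cars_by (j : Int) 0 ≤ car then parkAdvance cars_by len (j + 1) car
    else j
  else j
termination_by len - j

def park_alt (distances : List Int) (parking_order : List Int) (capacities : List Int) (k : Int) (f : Int) : List Int :=
  -- cars_by: running prefix sums 'total += max(0, capacities[p]); cars_by.append(total)'
  let cars_by := (parking_order.foldl (fun (acc : List Int × Int) p =>
      let t := acc.2 + max 0 (PySem.List.pyGetD capacities p 0)
      (acc.1 ++ [t], t)) ([], 0)).1
  -- 'for car in range(k)': range(k) is [0, …, k-1] for k ≥ 0 and [] otherwise, so List.range k.toNat is exact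
  ((List.range k.toNat).foldl (fun (st : List Int × Nat) (car : Nat) =>
      let j := parkAdvance cars_by parking_order.length st.2 (car : Int)
      if j = parking_order.length then (st.1 ++ [-1], j)
      else (st.1 ++ [f + PySem.List.pyGetD distances (PySem.List.pyGetD parking_order (j : Int) 0) 0], j))
    ([], 0)).1

-- ===== PRECONDITION & SPEC =====
-- Pre_ excludes exactly the inputs on which the Python A raises IndexError (B raises on the
-- same inputs): some parking index out of range for capacities (A reads capacities[p] for
-- every p), or a parking that actually serves a car (fewer than k cars parked before it and
-- positive capacity) whose index is out of range for distances.
def Pre_park (distances : List Int) (parking_order : List Int) (capacities : List Int) (k : Int) (f : Int) : Prop :=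
  (∀ p ∈ parking_order, PySem.Raise.InRange capacities.length p) ∧
  (∀ i ∈ List.range parking_order.length,
     ((parking_order.take i).map (fun q => max 0 (PySem.List.pyGetD capacities q 0))).sum < k →
     0 < PySem.List.pyGetD capacities (PySem.List.pyGetD parking_order (i : Int) 0) 0 →
     PySem.Raise.InRange distances.length (PySem.List.pyGetD parking_order (i : Int) 0))
instance (distances : List Int) (parking_order : List Int) (capacities : List Int) (k : Int) (f : Int) : Decidable (Pre_park distances parking_order capacities k f) := by unfold Pre_park; infer_instance

def pvWitness_park : List Int × List Int × List Int × Int × Int := ([3, 1, 4], [2, 0, 1], [1, 2, 1], 3, 10)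

def Spec_park (distances : List Int) (parking_order : List Int) (capacities : List Int) (k : Int) (f : Int) (out : List Int) : Prop := out = park_alt distances parking_order capacities k f
instance (distances : List Int) (parking_order : List Int) (capacities : List Int) (k : Int) (f : Int) (out : List Int) : Decidable (Spec_park distances parking_order capacities k f out) := by unfold Spec_park; infer_instance

-- ===== CLAIM (what is proved, stated in full; the proofs are below) =====
def Claim_equal_park : Prop := ∀ (distances : List Int) (parking_order : List Int) (capacities : List Int) (k : Int) (f : Int), Dom_park distances parking_order capacities k f → Pre_park distances parking_order capacities k f → Spec_park distances parking_order capacities k f (park distances parking_order capacities k f)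

-- ===== LEMMAS AND PROOFS =====

-- ---- shared intermediate forms (proof-level only) ----

-- the per-parking chunk fold: bridge between A's cursor filling and B's per-car scan
def chunkFold (dist cap : List Int) (k f : Int) (po : List Int) (r : List Int) : List Int :=
  po.foldl (fun res parking =>
      res ++ List.replicate (max 0 (min (PySem.List.pyGetD cap parking 0) (k - (res.length : Int)))).toNat
        (f + PySem.List.pyGetD dist parking 0)) r

-- prefix sums of clamped capacities along parking_order
def cbList (cap : List Int) : List Int → List Int
  | [] => []
  | p :: ps => (max 0 (PySem.List.pyGetD cap p 0)) ::
      (cbList cap ps).map (fun x => max 0 (PySem.List.pyGetD cap p 0) + x)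

def sumClamp (cap : List Int) (po : List Int) : Int :=
  (po.map (fun p => max 0 (PySem.List.pyGetD cap p 0))).sum

-- per-slot value: the cost of car number 'car'
def specVal (dist po cbl : List Int) (f : Int) (car : Int) : Int :=
  if parkAdvance cbl po.length 0 car = po.length then -1
  else f + PySem.List.pyGetD dist (PySem.List.pyGetD po ((parkAdvance cbl po.length 0 car : Nat) : Int) 0) 0

-- ---- A = chunk form ----

theorem parkInner_eq (k v : Int) (cnt : Nat) :
    ∀ (r : List Int), r.length ≤ k.toNat →
      parkInner cnt (r ++ List.replicate (k.toNat - r.length) (-1)) (r.length : Int) k v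
        = (r ++ List.replicate (min cnt (k.toNat - r.length)) v
             ++ List.replicate (k.toNat - r.length - min cnt (k.toNat - r.length)) (-1),
           ((r.length + min cnt (k.toNat - r.length) : Nat) : Int)) := by
  induction cnt with
  | zero => intro r hr; simp [parkInner]
  | succ n ih =>
    intro r hr
    by_cases h : r.length < k.toNat
    · have hlt : (r.length : Int) < k := by omega
      have hset : PySem.List.pySetD (r ++ List.replicate (k.toNat - r.length) (-1))
            (r.length : Int) v
          = (r ++ [v]) ++ List.replicate (k.toNat - (r ++ [v]).length) (-1) := by
        have hrep : (k.toNat - r.length) = (k.toNat - r.length - 1) + 1 := by omega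
        rw [show ((r.length : Int)) = ((r.length : Nat) : Int) from rfl,
            PySem.List.pySetD_natCast]
        rw [hrep, List.replicate_succ]
        simp
        omega
      have step := ih (r ++ [v]) (by simp; omega)
      simp only [parkInner, if_pos hlt, hset]
      rw [show (r.length : Int) + 1 = (((r ++ [v]).length : Nat) : Int) by simp] at *
      rw [step]
      simp only [Prod.mk.injEq]
      constructor
      · simp only [List.append_assoc, List.length_append, List.length_singleton]
        congr 1
        rw [show List.replicate (min (n + 1) (k.toNat - r.length)) v
              = [v] ++ List.replicate (min (n + 1) (k.toNat - r.length) - 1) v by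
            simp only [List.singleton_append, ← List.replicate_succ]; congr 1; omega]
        simp only [List.append_assoc]
        congr 2
        · congr 1; omega
        · congr 1; omega
      · simp; omega
    · have hnlt : ¬ (r.length : Int) < k := by omega
      have h0 : k.toNat - r.length = 0 := by omega
      simp [parkInner, hnlt, h0]

theorem chunk_toNat (c : Int) (k : Int) (rl : Nat) (h : rl ≤ k.toNat) :
    (max 0 (min c (k - (rl : Int)))).toNat = min c.toNat (k.toNat - rl) := by
  simp only [max_def, min_def]
  split_ifs <;> omega

theorem fold_eq (distances capacities : List Int) (k f : Int) (po : List Int) :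
    ∀ (r : List Int), r.length ≤ k.toNat →
      (po.foldl (fun st parking =>
          parkInner (PySem.List.pyGetD capacities parking 0).toNat st.1 st.2 k
            (f + PySem.List.pyGetD distances parking 0))
        (r ++ List.replicate (k.toNat - r.length) (-1), (r.length : Int)))
      = (let r' := chunkFold distances capacities k f po r
         (r' ++ List.replicate (k.toNat - r'.length) (-1), (r'.length : Int))) := by
  induction po with
  | nil => intro r hr; simp [chunkFold]
  | cons p ps ih =>
    intro r hr
    simp only [List.foldl_cons, chunkFold]
    rw [parkInner_eq _ _ _ r hr]
    have hmin : min (PySem.List.pyGetD capacities p 0).toNat (k.toNat - r.length)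
        = (max 0 (min (PySem.List.pyGetD capacities p 0) (k - (r.length : Int)))).toNat := by
      rw [chunk_toNat _ _ _ hr]
    have hstep := ih (r ++ List.replicate
        (max 0 (min (PySem.List.pyGetD capacities p 0) (k - (r.length : Int)))).toNat
        (f + PySem.List.pyGetD distances p 0))
      (by simp; omega)
    simp only [chunkFold] at hstep
    rw [hmin]
    set n := (max 0 (min (PySem.List.pyGetD capacities p 0) (k - (r.length : Int)))).toNat with hn
    have hpad : r ++ List.replicate n (f + PySem.List.pyGetD distances p 0)
          ++ List.replicate (k.toNat - r.length - n) (-1)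
        = (r ++ List.replicate n (f + PySem.List.pyGetD distances p 0))
          ++ List.replicate (k.toNat - (r ++ List.replicate n (f + PySem.List.pyGetD distances p 0)).length) (-1) := by
      simp only [List.append_assoc, List.length_append, List.length_replicate]
      rw [show k.toNat - (r.length + n) = k.toNat - r.length - n from by omega]
    have hlen : ((r.length + n : Nat) : Int)
        = (((r ++ List.replicate n (f + PySem.List.pyGetD distances p 0)).length : Nat) : Int) := by
      simp
    rw [hpad, hlen, hstep]

theorem fold_len (distances capacities : List Int) (k f : Int) (po : List Int) :
    ∀ (r : List Int), r.length ≤ k.toNat → (chunkFold distances capacities k f po r).length ≤ k.toNat := by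
  induction po with
  | nil => intro r hr; simpa [chunkFold] using hr
  | cons p ps ih =>
    intro r hr
    simp only [chunkFold, List.foldl_cons]
    exact ih _ (by simp; omega)

theorem park_eq_chunk (distances parking_order capacities : List Int) (k f : Int) :
    park distances parking_order capacities k f
      = chunkFold distances capacities k f parking_order []
        ++ List.replicate (k - ((chunkFold distances capacities k f parking_order []).length : Int)).toNat (-1) := by
  unfold park
  have h := fold_eq distances capacities k f parking_order [] (by simp)
  simp only [List.length_nil, Nat.sub_zero, List.nil_append, Nat.cast_zero] at h
  have hlen := fold_len distances capacities k f parking_order [] (by simp)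
  simp only [h]
  congr 2
  omega

-- ---- parkAdvance characterization ----

theorem parkAdvance_le (cbl : List Int) (len j : Nat) (car : Int) (h : j ≤ len) :
    parkAdvance cbl len j car ≤ len := by
  fun_induction parkAdvance cbl len j car <;> omega

theorem parkAdvance_mid (cbl : List Int) (len j : Nat) (car : Int) :
    ∀ i, j ≤ i → i < parkAdvance cbl len j car → PySem.List.pyGetD cbl (i : Int) 0 ≤ car := by
  fun_induction parkAdvance cbl len j car with
  | case1 j h1 h2 ih =>
    intro i hji hlt
    rcases Nat.eq_or_lt_of_le hji with rfl | hj
    · exact h2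
    · exact ih i hj hlt
  | case2 j h1 h2 => intro i hji hlt; omega
  | case3 j h1 => intro i hji hlt; omega

theorem parkAdvance_congr (cbl : List Int) (len : Nat) (car : Int) :
    ∀ (j1 j2 : Nat), j1 ≤ j2 → j2 ≤ len →
      (∀ i, j1 ≤ i → i < j2 → PySem.List.pyGetD cbl (i : Int) 0 ≤ car) →
      parkAdvance cbl len j1 car = parkAdvance cbl len j2 car := by
  intro j1 j2 h12 h2 hall
  induction hd : j2 - j1 generalizing j1 with
  | zero =>
    have : j1 = j2 := by omega
    rw [this]
  | succ n ih =>
    have hlt : j1 < len := by omega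
    have hle : PySem.List.pyGetD cbl (j1 : Int) 0 ≤ car := hall j1 le_rfl (by omega)
    conv_lhs => rw [parkAdvance]
    rw [dif_pos hlt, if_pos hle]
    exact ih (j1 + 1) (by omega) (fun i hi hlt' => hall i (by omega) hlt') (by omega)

theorem parkAdvance_cons (c0 : Int) (rest : List Int) (len j : Nat) (car : Int) :
    parkAdvance (c0 :: rest) (len + 1) (j + 1) car = parkAdvance rest len j car + 1 := by
  fun_induction parkAdvance rest len j car with
  | case1 j h1 h2 ih =>
    rw [parkAdvance, dif_pos (by omega : j + 1 < len + 1)]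
    have hg : PySem.List.pyGetD (c0 :: rest) ((j + 1 : Nat) : Int) 0
        = PySem.List.pyGetD rest (j : Int) 0 := by
      rw [PySem.List.pyGetD_natCast, PySem.List.pyGetD_natCast, List.getD_cons_succ]
    rw [hg, if_pos h2]
    exact ih
  | case2 j h1 h2 =>
    rw [parkAdvance, dif_pos (by omega : j + 1 < len + 1)]
    have hg : PySem.List.pyGetD (c0 :: rest) ((j + 1 : Nat) : Int) 0
        = PySem.List.pyGetD rest (j : Int) 0 := by
      rw [PySem.List.pyGetD_natCast, PySem.List.pyGetD_natCast, List.getD_cons_succ]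
    rw [hg, if_neg h2]
  | case3 j h1 =>
    rw [parkAdvance, dif_neg (by omega : ¬ j + 1 < len + 1)]

theorem parkAdvance_cons_zero (c0 : Int) (rest : List Int) (len : Nat) (car : Int)
    (h : c0 ≤ car) :
    parkAdvance (c0 :: rest) (len + 1) 0 car = parkAdvance rest len 0 car + 1 := by
  have h0 : PySem.List.pyGetD (c0 :: rest) ((0 : Nat) : Int) 0 = c0 := by
    norm_num [PySem.List.pyGetD_zero_cons]
  rw [parkAdvance, dif_pos (by omega), h0, if_pos h]
  exact parkAdvance_cons c0 rest len 0 car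

theorem parkAdvance_cons_zero_lt (c0 : Int) (rest : List Int) (len : Nat) (car : Int)
    (h : car < c0) :
    parkAdvance (c0 :: rest) (len + 1) 0 car = 0 := by
  have h0 : PySem.List.pyGetD (c0 :: rest) ((0 : Nat) : Int) 0 = c0 := by
    norm_num [PySem.List.pyGetD_zero_cons]
  rw [parkAdvance, dif_pos (by omega), h0, if_neg (by omega)]

theorem parkAdvance_map (c0 : Int) (rest : List Int) (len j : Nat) (car : Int)
    (hlen : len ≤ rest.length) :
    parkAdvance (rest.map (fun x => c0 + x)) len j car = parkAdvance rest len j (car - c0) := by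
  fun_induction parkAdvance rest len j (car - c0) with
  | case1 j h1 h2 ih =>
    rw [parkAdvance, dif_pos h1]
    have hj : j < rest.length := by omega
    have hg : PySem.List.pyGetD (rest.map (fun x => c0 + x)) (j : Int) 0 = c0 + rest[j] := by
      rw [PySem.List.pyGetD_natCast, List.getD_eq_getElem _ _ (by simpa using hj)]
      simp
    rw [PySem.List.pyGetD_natCast, List.getD_eq_getElem _ _ hj] at h2
    rw [hg, if_pos (by omega)]
    exact ih
  | case2 j h1 h2 =>
    rw [parkAdvance, dif_pos h1]
    have hj : j < rest.length := by omega
    have hg : PySem.List.pyGetD (rest.map (fun x => c0 + x)) (j : Int) 0 = c0 + rest[j] := by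
      rw [PySem.List.pyGetD_natCast, List.getD_eq_getElem _ _ (by simpa using hj)]
      simp
    rw [PySem.List.pyGetD_natCast, List.getD_eq_getElem _ _ hj] at h2
    rw [hg, if_neg (by omega)]
  | case3 j h1 =>
    rw [parkAdvance, dif_neg h1]

-- ---- B = map specVal ----

theorem length_cbList (cap : List Int) (po : List Int) : (cbList cap po).length = po.length := by
  induction po with
  | nil => rfl
  | cons p ps ih => simp [cbList, ih]

theorem carsFold_eq (cap : List Int) (po : List Int) :
    ∀ (l : List Int) (t : Int),
      (po.foldl (fun (acc : List Int × Int) p =>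
          let t' := acc.2 + max 0 (PySem.List.pyGetD cap p 0)
          (acc.1 ++ [t'], t')) (l, t))
        = (l ++ (cbList cap po).map (fun x => t + x), t + sumClamp cap po) := by
  induction po with
  | nil => intro l t; simp [cbList, sumClamp]
  | cons p ps ih =>
    intro l t
    simp only [List.foldl_cons]
    rw [ih]
    simp [cbList, sumClamp, List.map_map, Function.comp_def, add_assoc]

theorem altFold_inv (dist po cbl : List Int) (f : Int) (n : Nat) :
    ∃ jn, ((List.range n).foldl (fun (st : List Int × Nat) (car : Nat) =>
        let j := parkAdvance cbl po.length st.2 (car : Int)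
        if j = po.length then (st.1 ++ [-1], j)
        else (st.1 ++ [f + PySem.List.pyGetD dist (PySem.List.pyGetD po (j : Int) 0) 0], j))
      ([], 0))
      = ((List.range n).map (fun (c : Nat) => specVal dist po cbl f (c : Int)), jn)
      ∧ jn ≤ po.length ∧ (∀ i, i < jn → PySem.List.pyGetD cbl (i : Int) 0 < (n : Int)) := by
  induction n with
  | zero => exact ⟨0, by simp, by omega, by omega⟩
  | succ n ih =>
    obtain ⟨jn, hfold, hle, hinv⟩ := ih
    have hadv : parkAdvance cbl po.length 0 (n : Int) = parkAdvance cbl po.length jn (n : Int) :=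
      parkAdvance_congr cbl po.length (n : Int) 0 jn (by omega) hle
        (fun i _ hi => le_of_lt (hinv i hi))
    refine ⟨parkAdvance cbl po.length jn (n : Int), ?_, ?_, ?_⟩
    · rw [List.range_succ, List.foldl_append, hfold]
      simp only [List.foldl_cons, List.foldl_nil, List.map_append, List.map_cons, List.map_nil]
      by_cases h : parkAdvance cbl po.length jn (n : Int) = po.length
      · simp [h, specVal, hadv]
      · simp [h, specVal, hadv]
    · exact parkAdvance_le cbl po.length jn (n : Int) hle
    · intro i hi
      by_cases h : i < jn
      · have := hinv i h; push_cast; omega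
      · have h1 : jn ≤ i := by omega
        have := parkAdvance_mid cbl po.length jn (n : Int) i h1 hi
        push_cast; omega

theorem park_alt_eq_spec (distances parking_order capacities : List Int) (k f : Int) :
    park_alt distances parking_order capacities k f
      = (List.range k.toNat).map
          (fun (c : Nat) => specVal distances parking_order (cbList capacities parking_order) f (c : Int)) := by
  unfold park_alt
  rw [carsFold_eq]
  simp only [List.nil_append, zero_add]
  have hmap : (cbList capacities parking_order).map (fun x => x)
      = cbList capacities parking_order := List.map_id' _
  rw [hmap]
  obtain ⟨jn, hfold, -, -⟩ := altFold_inv distances parking_order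
    (cbList capacities parking_order) f k.toNat
  rw [hfold]

-- ---- chunk form = map specVal ----

theorem map_range_eq_replicate {g : Nat → Int} {n : Nat} {v : Int} (h : ∀ c, c < n → g c = v) :
    (List.range n).map g = List.replicate n v := by
  rw [List.eq_replicate_iff]
  constructor
  · simp
  · intro b hb
    obtain ⟨c, hc, rfl⟩ := List.mem_map.1 hb
    exact h c (List.mem_range.1 hc)

theorem chunkFold_shift (dist cap : List Int) (f : Int) :
    ∀ (po : List Int) (k : Int) (r : List Int),
      chunkFold dist cap k f po r = r ++ chunkFold dist cap (k - r.length) f po [] := by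
  intro po
  induction po with
  | nil => intro k r; simp [chunkFold]
  | cons p ps ih =>
    intro k r
    have hcons : ∀ (k' : Int) (r' : List Int), chunkFold dist cap k' f (p :: ps) r'
        = chunkFold dist cap k' f ps (r' ++ List.replicate
            (max 0 (min (PySem.List.pyGetD cap p 0) (k' - (r'.length : Int)))).toNat
            (f + PySem.List.pyGetD dist p 0)) := by
      intro k' r'; simp [chunkFold]
    rw [hcons, ih, hcons]
    rw [ih (k - (r.length : Int))]
    simp only [List.nil_append, List.length_nil, Nat.cast_zero, sub_zero, List.length_append,
      List.length_replicate, List.append_assoc]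
    have harg : k - (((r.length + (max 0 (min (PySem.List.pyGetD cap p 0) (k - (r.length : Int)))).toNat) : Nat) : Int)
        = k - (r.length : Int) - ((max 0 (min (PySem.List.pyGetD cap p 0) (k - (r.length : Int)))).toNat : Int) := by
      push_cast; ring
    rw [harg]

theorem chunkFold_nonpos (dist cap : List Int) (f : Int) (po : List Int) :
    ∀ (k : Int), k ≤ 0 → chunkFold dist cap k f po [] = [] := by
  induction po with
  | nil => intro k hk; simp [chunkFold]
  | cons p ps ih =>
    intro k hk
    have h0 : (max 0 (min (PySem.List.pyGetD cap p 0) k)).toNat = 0 := by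
      omega
    have hcons : chunkFold dist cap k f (p :: ps) []
        = chunkFold dist cap k f ps ([] ++ List.replicate
            (max 0 (min (PySem.List.pyGetD cap p 0) (k - (([] : List Int).length : Int)))).toNat
            (f + PySem.List.pyGetD dist p 0)) := by
      simp [chunkFold]
    rw [hcons]
    simp only [List.length_nil, Nat.cast_zero, sub_zero, h0, List.replicate_zero, List.append_nil]
    exact ih k hk

theorem chunk_eq_spec (dist cap : List Int) (f : Int) :
    ∀ (po : List Int) (k : Int),
      chunkFold dist cap k f po [] ++ List.replicate (k - ((chunkFold dist cap k f po []).length : Int)).toNat (-1)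
        = (List.range k.toNat).map (fun (c : Nat) => specVal dist po (cbList cap po) f (c : Int)) := by
  intro po
  induction po with
  | nil =>
    intro k
    have h1 : chunkFold dist cap k f [] [] = [] := by simp [chunkFold]
    rw [h1]
    simp only [List.nil_append, List.length_nil, Nat.cast_zero, sub_zero]
    refine (map_range_eq_replicate ?_).symm
    intro cc hcc
    have hadv : parkAdvance (cbList cap []) 0 0 (cc : Int) = 0 := by
      rw [parkAdvance]
      simp
    simp [specVal, hadv]
  | cons p ps ih =>
    intro k
    by_cases hk : k ≤ 0
    · rw [chunkFold_nonpos dist cap f (p :: ps) k hk]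
      have hk0 : k.toNat = 0 := by omega
      simp only [List.nil_append, List.length_nil, Nat.cast_zero, sub_zero, hk0,
        List.replicate_zero, List.range_zero, List.map_nil]
    · replace hk : 0 < k := by omega
      set c := PySem.List.pyGetD cap p 0 with hc
      set v0 := f + PySem.List.pyGetD dist p 0 with hv0
      set n0 := (max 0 (min c k)).toNat with hn0
      have hn0k : n0 ≤ k.toNat := by omega
      have hcb : cbList cap (p :: ps) = max 0 c :: (cbList cap ps).map (fun x => max 0 c + x) := by
        simp [cbList, ← hc]
      have hsplit : chunkFold dist cap k f (p :: ps) []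
          = List.replicate n0 v0 ++ chunkFold dist cap (k - (n0 : Int)) f ps [] := by
        have h1 : chunkFold dist cap k f (p :: ps) [] = chunkFold dist cap k f ps (List.replicate n0 v0) := by
          simp [chunkFold, hn0, hc, hv0]
        rw [h1, chunkFold_shift dist cap f ps k (List.replicate n0 v0)]
        simp
      rw [hsplit, List.append_assoc]
      have hpad : k - (((List.replicate n0 v0 ++ chunkFold dist cap (k - (n0 : Int)) f ps []).length : Nat) : Int)
          = (k - (n0 : Int)) - ((chunkFold dist cap (k - (n0 : Int)) f ps []).length : Int) := by
        simp
        ring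
      rw [hpad, ih (k - (n0 : Int))]
      have hkn : k.toNat = n0 + (k - (n0 : Int)).toNat := by omega
      rw [hkn, List.range_add, List.map_append, List.map_map]
      congr 1
      · refine (map_range_eq_replicate ?_).symm
        intro cc hcc
        have hlt : (cc : Int) < max 0 c := by omega
        have hadv : parkAdvance (cbList cap (p :: ps)) (ps.length + 1) 0 (cc : Int) = 0 := by
          rw [hcb]
          exact parkAdvance_cons_zero_lt _ _ _ _ hlt
        simp [specVal, hadv, ← hv0]
      · apply List.map_congr_left
        intro cc hcc
        have hccm : cc < (k - (n0 : Int)).toNat := List.mem_range.1 hcc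
        have hn0c : (n0 : Int) = max 0 c := by omega
        have hlen : ps.length ≤ (cbList cap ps).length := by rw [length_cbList]
        have hstep : parkAdvance (cbList cap (p :: ps)) (p :: ps).length 0 ((n0 + cc : Nat) : Int)
            = parkAdvance (cbList cap ps) ps.length 0 (cc : Int) + 1 := by
          rw [hcb, show (p :: ps).length = ps.length + 1 from rfl]
          rw [parkAdvance_cons_zero _ _ _ _ (by omega)]
          rw [parkAdvance_map (max 0 c) (cbList cap ps) ps.length 0 _ hlen]
          have harg : ((n0 + cc : Nat) : Int) - max 0 c = (cc : Int) := by push_cast; omega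
          rw [harg]
        show specVal dist ps (cbList cap ps) f (cc : Int)
            = specVal dist (p :: ps) (cbList cap (p :: ps)) f ((n0 + cc : Nat) : Int)
        unfold specVal
        rw [hstep]
        by_cases hj : parkAdvance (cbList cap ps) ps.length 0 (cc : Int) = ps.length
        · simp [hj]
        · have hne : parkAdvance (cbList cap ps) ps.length 0 (cc : Int) + 1 ≠ (p :: ps).length := by
            simp only [List.length_cons]
            omega
          rw [if_neg hj, if_neg hne]
          have hidx : PySem.List.pyGetD (p :: ps)
              ((↑(parkAdvance (cbList cap ps) ps.length 0 (cc : Int) + 1) : Int)) 0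
              = PySem.List.pyGetD ps ((parkAdvance (cbList cap ps) ps.length 0 (cc : Int) : Nat) : Int) 0 := by
            rw [PySem.List.pyGetD_natCast, PySem.List.pyGetD_natCast, List.getD_cons_succ]
          rw [hidx]

-- ===== VERDICT (by name: the statement is the Claim_ definition above) =====
theorem park_spec : Claim_equal_park := by
  intro distances parking_order capacities k f _ _
  unfold Spec_park
  rw [park_eq_chunk, park_alt_eq_spec, chunk_eq_spec]
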